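-- pv_equiv track=rewrite | github.com/hnrm110901-cell/tunxiang-os | services/tx-agent/src/services/ai_coach_service.py | _generate_peak_analysis
-- ===== SOURCE A (Python) =====
-- SLOT_NAMES: dict[str, str] = {
--     "morning_prep": "早间准备",
--     "lunch_buildup": "午市预备",
--     "lunch_peak": "午市高峰",
--     "afternoon_lull": "午后低峰",
--     "dinner_buildup": "晚市预备",
--     "dinner_peak": "晚市高峰",
--     "closing": "闭店收尾",
-- }
--
-- def _generate_peak_analysis(
--     anomalies: list[dict],
--     slot_code: str,
-- ) -> str:
--     """生成高峰期AI分析"""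
--     slot_name = SLOT_NAMES.get(slot_code, slot_code)
--     critical = [a for a in anomalies if a["severity"] == "critical"]
--     warning = [a for a in anomalies if a["severity"] == "warning"]
--
--     parts: list[str] = [f"[{slot_name}预警] "]
--
--     if critical:
--         names = "、".join(a.get("metric_name", a["metric"]) for a in critical)
--         parts.append(f"红色预警: {names}严重偏离基线。")
--     if warning:
--         names = "、".join(a.get("metric_name", a["metric"]) for a in warning)
--         parts.append(f"黄色预警: {names}轻微偏离。")
--
--     # 综合建议
--     if any(a["metric"] == "serve_time_min" for a in anomalies):
--         parts.append("建议优先检查后厨出餐效率。")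
--     if any(a["metric"] == "customer_complaints" for a in anomalies):
--         parts.append("前厅服务需加强巡台频次。")
--
--     return "".join(parts)
-- ===== SOURCE B (Python) =====
-- SLOT_NAMES: dict[str, str] = {
--     "morning_prep": "早间准备",
--     "lunch_buildup": "午市预备",
--     "lunch_peak": "午市高峰",
--     "afternoon_lull": "午后低峰",
--     "dinner_buildup": "晚市预备",
--     "dinner_peak": "晚市高峰",
--     "closing": "闭店收尾",
-- }
--
-- def _generate_peak_analysis(
--     anomalies: list[dict],
--     slot_code: str,
-- ) -> str:
--     """生成高峰期AI分析 (single pass over anomalies)"""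
--     critical_names: list[str] = []
--     warning_names: list[str] = []
--     has_serve = False
--     has_complaints = False
--     for a in anomalies:
--         sev = a["severity"]
--         if sev == "critical":
--             critical_names.append(a.get("metric_name", a["metric"]))
--         elif sev == "warning":
--             warning_names.append(a.get("metric_name", a["metric"]))
--         metric = a.get("metric")
--         if metric == "serve_time_min":
--             has_serve = True
--         elif metric == "customer_complaints":
--             has_complaints = True
--
--     result = f"[{SLOT_NAMES.get(slot_code, slot_code)}预警] "
--     if critical_names:
--         result += f"红色预警: {'、'.join(critical_names)}严重偏离基线。"
--     if warning_names:
--         result += f"黄色预警: {'、'.join(warning_names)}轻微偏离。"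
--     if has_serve:
--         result += "建议优先检查后厨出餐效率。"
--     if has_complaints:
--         result += "前厅服务需加强巡台频次。"
--     return result
-- ===== Notes on version B (the rewrite author's own statement) =====
-- stated objective: alternative
-- what changed: Replaces A's four separate scans of the anomaly list (two severity comprehensions plus two any() membership scans) by a single accumulating pass that collects both name lists and both metric flags, then builds the result string with += instead of a parts list joined at the end.
import Mathlib
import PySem

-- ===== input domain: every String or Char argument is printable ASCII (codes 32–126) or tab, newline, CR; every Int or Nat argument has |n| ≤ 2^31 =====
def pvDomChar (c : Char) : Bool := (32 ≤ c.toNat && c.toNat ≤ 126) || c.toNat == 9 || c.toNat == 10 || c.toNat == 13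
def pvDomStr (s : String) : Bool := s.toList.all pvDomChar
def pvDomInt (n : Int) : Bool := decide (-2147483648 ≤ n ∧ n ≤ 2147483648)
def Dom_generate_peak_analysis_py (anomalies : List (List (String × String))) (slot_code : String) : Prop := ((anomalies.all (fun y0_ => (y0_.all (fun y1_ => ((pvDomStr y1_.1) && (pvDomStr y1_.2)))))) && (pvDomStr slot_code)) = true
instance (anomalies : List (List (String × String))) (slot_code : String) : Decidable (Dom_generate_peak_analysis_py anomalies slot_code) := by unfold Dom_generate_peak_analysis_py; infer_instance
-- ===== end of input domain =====

-- B replaces A's four separate scans of the anomaly list (two severity comprehensions + two any())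
-- by one accumulating pass; same return value (objective: alternative decomposition, not claimed faster).

-- shared Python-dict-lookup helper: d.get(k, dflt) / d[k] on an association list (first match)
def pvGetD (a : List (String × String)) (k dflt : String) : String :=
  (PySem.Dict.mk a).getD k dflt

-- d.contains k / 'k in d'
def pvContains (a : List (String × String)) (k : String) : Bool :=
  (PySem.Dict.mk a).contains k

-- module constant SLOT_NAMES
def pvSlotNames : List (String × String) :=
  [("morning_prep", "早间准备"), ("lunch_buildup", "午市预备"), ("lunch_peak", "午市高峰"),
   ("afternoon_lull", "午后低峰"), ("dinner_buildup", "晚市预备"), ("dinner_peak", "晚市高峰"),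
   ("closing", "闭店收尾")]

-- ===== PORT A =====
def generate_peak_analysis_py (anomalies : List (List (String × String))) (slot_code : String) : String :=
  let slot_name := pvGetD pvSlotNames slot_code slot_code
  let critical := anomalies.filter (fun a => pvGetD a "severity" "" == "critical")
  let warning := anomalies.filter (fun a => pvGetD a "severity" "" == "warning")
  let parts : List String := ["[" ++ slot_name ++ "预警] "]
  let parts := if !critical.isEmpty then
      parts ++ ["红色预警: " ++ PySem.Str.join "、" (critical.map (fun a => pvGetD a "metric_name" (pvGetD a "metric" ""))) ++ "严重偏离基线。"]
    else parts
  let parts := if !warning.isEmpty then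
      parts ++ ["黄色预警: " ++ PySem.Str.join "、" (warning.map (fun a => pvGetD a "metric_name" (pvGetD a "metric" ""))) ++ "轻微偏离。"]
    else parts
  let parts := if anomalies.any (fun a => pvGetD a "metric" "" == "serve_time_min") then
      parts ++ ["建议优先检查后厨出餐效率。"] else parts
  let parts := if anomalies.any (fun a => pvGetD a "metric" "" == "customer_complaints") then
      parts ++ ["前厅服务需加强巡台频次。"] else parts
  PySem.Str.join "" parts

-- ===== PORT B =====
-- B's loop body: one anomaly updates (critical_names, warning_names, has_serve, has_complaints).
-- a.get("metric") (None when missing) compared to a nonempty literal is ported as getD with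
-- default "" — exact, since "" never equals either literal.
def pvStepB (st : List String × List String × Bool × Bool) (a : List (String × String)) :
    List String × List String × Bool × Bool :=
  let sev := pvGetD a "severity" ""
  let st1 :=
    if sev == "critical" then (st.1 ++ [pvGetD a "metric_name" (pvGetD a "metric" "")], st.2.1, st.2.2.1, st.2.2.2)
    else if sev == "warning" then (st.1, st.2.1 ++ [pvGetD a "metric_name" (pvGetD a "metric" "")], st.2.2.1, st.2.2.2)
    else st
  let metric := pvGetD a "metric" ""
  if metric == "serve_time_min" then (st1.1, st1.2.1, true, st1.2.2.2)
  else if metric == "customer_complaints" then (st1.1, st1.2.1, st1.2.2.1, true)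
  else st1

def generate_peak_analysis_py_alt (anomalies : List (List (String × String))) (slot_code : String) : String :=
  let st := anomalies.foldl pvStepB ([], [], false, false)
  let result := "[" ++ pvGetD pvSlotNames slot_code slot_code ++ "预警] "
  let result := if !st.1.isEmpty then
      result ++ ("红色预警: " ++ PySem.Str.join "、" st.1 ++ "严重偏离基线。") else result
  let result := if !st.2.1.isEmpty then
      result ++ ("黄色预警: " ++ PySem.Str.join "、" st.2.1 ++ "轻微偏离。") else result
  let result := if st.2.2.1 then result ++ "建议优先检查后厨出餐效率。" else result
  let result := if st.2.2.2 then result ++ "前厅服务需加强巡台频次。" else result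
  result

-- ===== PRECONDITION & SPEC =====
-- prefix condition of Python's any(a["metric"] == v …): the scan raises no KeyError, i.e. every
-- anomaly it visits (up to and including the first whose "metric" equals v) has a "metric" key
def pvScanOK (v : String) : List (List (String × String)) → Bool
  | [] => true
  | a :: l => pvContains a "metric" && (pvGetD a "metric" "" == v || pvScanOK v l)

-- Pre_ is exactly the inputs on which Python A returns (no KeyError): every anomaly has a
-- "severity" key, every critical/warning anomaly has a "metric" key (a.get("metric_name",
-- a["metric"]) evaluates a["metric"] eagerly), and neither any()-scan reaches a missing
-- "metric" before its short-circuit.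
def Pre_generate_peak_analysis_py (anomalies : List (List (String × String))) (slot_code : String) : Prop :=
  ((anomalies.all (fun a => pvContains a "severity" &&
      (!(pvGetD a "severity" "" == "critical" || pvGetD a "severity" "" == "warning") || pvContains a "metric")))
   && pvScanOK "serve_time_min" anomalies && pvScanOK "customer_complaints" anomalies) = true
instance (anomalies : List (List (String × String))) (slot_code : String) : Decidable (Pre_generate_peak_analysis_py anomalies slot_code) := by unfold Pre_generate_peak_analysis_py; infer_instance

def pvWitness_generate_peak_analysis_py : (List (List (String × String))) × String :=
  ([[("severity", "critical"), ("metric", "serve_time_min")],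
    [("severity", "warning"), ("metric", "x"), ("metric_name", "MN")]], "lunch_peak")

def Spec_generate_peak_analysis_py (anomalies : List (List (String × String))) (slot_code : String) (out : String) : Prop := out = generate_peak_analysis_py_alt anomalies slot_code
instance (anomalies : List (List (String × String))) (slot_code : String) (out : String) : Decidable (Spec_generate_peak_analysis_py anomalies slot_code out) := by unfold Spec_generate_peak_analysis_py; infer_instance

-- ===== CLAIM (what is proved, stated in full; the proofs are below) =====
def Claim_equal_generate_peak_analysis_py : Prop := ∀ (anomalies : List (List (String × String))) (slot_code : String), Dom_generate_peak_analysis_py anomalies slot_code → Pre_generate_peak_analysis_py anomalies slot_code → Spec_generate_peak_analysis_py anomalies slot_code (generate_peak_analysis_py anomalies slot_code)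


-- ===== LEMMAS AND PROOFS =====

-- B's single fold computes exactly A's two filtered name lists and two any()-flags
theorem pvFoldB_spec (l : List (List (String × String))) (c w : List String) (s t : Bool) :
    l.foldl pvStepB (c, w, s, t) =
      (c ++ (l.filter (fun a => pvGetD a "severity" "" == "critical")).map
              (fun a => pvGetD a "metric_name" (pvGetD a "metric" "")),
       w ++ (l.filter (fun a => pvGetD a "severity" "" == "warning")).map
              (fun a => pvGetD a "metric_name" (pvGetD a "metric" "")),
       s || l.any (fun a => pvGetD a "metric" "" == "serve_time_min"),
       t || l.any (fun a => pvGetD a "metric" "" == "customer_complaints")) := by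
  induction l generalizing c w s t with
  | nil => simp
  | cons a l ih =>
    simp only [List.foldl_cons, List.filter_cons, List.any_cons]
    cases hc : pvGetD a "severity" "" == "critical" <;>
      cases hw : pvGetD a "severity" "" == "warning" <;>
        cases hs : pvGetD a "metric" "" == "serve_time_min" <;>
          cases ht : pvGetD a "metric" "" == "customer_complaints" <;>
            simp [pvStepB, hc, hw, hs, ht, ih, List.append_assoc] <;> simp_all

-- "".join on a parts list is iterated append
theorem pvJoinNil : PySem.Str.join "" [] = "" := by decide
theorem pvJoinCons (a : String) (xs : List String) :
    PySem.Str.join "" (a :: xs) = a ++ PySem.Str.join "" xs := by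
  have h : (PySem.Str.join "" (a :: xs)).toList = (a ++ PySem.Str.join "" xs).toList := by
    simp [PySem.Str.toList_join, PySem.Chars.join]
    cases xs <;> simp [List.intercalate]
  exact String.toList_inj.mp h

theorem generate_peak_analysis_py_spec : Claim_equal_generate_peak_analysis_py := by
  intro anomalies slot_code _ _
  unfold Spec_generate_peak_analysis_py
  unfold generate_peak_analysis_py generate_peak_analysis_py_alt
  rw [pvFoldB_spec]
  simp only [List.nil_append, Bool.false_or, List.isEmpty_map]
  split_ifs <;> simp only [List.cons_append, List.nil_append,
    pvJoinCons, pvJoinNil, String.append_assoc, String.append_empty]
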